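-- pv_equiv track=rewrite | github.com/zero0205/Algorithm_Python | baekjoon/DP/27134_Subset Sums.py | solution
-- ===== SOURCE A (Python) =====
-- def solution(n):
--     total = n*(n+1)//2
--     if total % 2 == 1:
--         return 0
--     dp = [[0]*(total//2+1) for _ in range(n+1)]
--
--     for i in range(n+1):
--         dp[i][0] = 1
--
--     for i in range(1, n+1):
--         for j in range(1, total//2+1):
--             dp[i][j] = dp[i-1][j]
--             if j-i >= 0:
--                 dp[i][j] += dp[i-1][j-i]
--     return dp[n][total//2]//2
-- ===== SOURCE B (Python) =====
-- def solution(n):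
--     total = n * (n + 1) // 2
--     if total % 2 == 1:
--         return 0
--     half = total // 2
--     memo = [[None] * (half + 1) for _ in range(n + 1)]
--
--     def f(i, j):
--         if i == 0:
--             return 1 if j == 0 else 0
--         if memo[i][j] is None:
--             r = f(i - 1, j)
--             if j >= i:
--                 r += f(i - 1, j - i)
--             memo[i][j] = r
--         return memo[i][j]
--
--     return f(n, half) // 2
-- ===== Notes on version B (the rewrite author's own statement) =====
-- stated objective: alternative
-- what changed: Replaces A's bottom-up table filled by two nested forward loops with a top-down recursion f(i,j) memoized in a None-initialized table, computing only the states the recursion actually reaches; keeps the odd-total early return and the final integer halving.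
import Mathlib
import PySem

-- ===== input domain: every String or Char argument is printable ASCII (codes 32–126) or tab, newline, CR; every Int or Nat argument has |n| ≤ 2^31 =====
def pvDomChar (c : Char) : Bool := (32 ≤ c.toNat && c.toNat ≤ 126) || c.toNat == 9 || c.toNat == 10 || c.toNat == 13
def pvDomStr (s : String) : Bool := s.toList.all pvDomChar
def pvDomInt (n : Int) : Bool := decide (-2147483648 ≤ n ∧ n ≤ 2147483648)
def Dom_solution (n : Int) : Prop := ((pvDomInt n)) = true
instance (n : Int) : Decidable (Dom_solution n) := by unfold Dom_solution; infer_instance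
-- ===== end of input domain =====

-- B replaces A's bottom-up (n+1) x (total//2+1) table filled by nested forward loops
-- with a top-down recursion f(i, j) memoized in a None-initialized table; equivalence
-- is proved on Pre_solution (outside it both Pythons raise IndexError).

-- ===== PORT A =====
-- Python's lists are mutable arrays, so the 2D list is ported as Array (Array Int);
-- dp[i][j] = v is a no-op out of bounds here where Python raises IndexError, but
-- every index reached under Pre_ is in range, so both helpers are exact there.
def pvGetCell (dp : Array (Array Int)) (i j : Nat) : Int := (dp.getD i #[]).getD j 0
def pvSetCell {α : Type} (dp : Array (Array α)) (i j : Nat) (v : α) : Array (Array α) :=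
  -- row taken out and put back so the update is in place, like Python's dp[i][j] = v
  let row := dp.getD i #[]
  let dp := dp.setIfInBounds i #[]
  dp.setIfInBounds i (row.setIfInBounds j v)

def solution (n : Int) : Int :=
  let total := PySem.Int.floordiv (n * (n + 1)) 2
  if PySem.Int.mod total 2 = 1 then 0
  else
    let half := PySem.Int.floordiv total 2
    -- dp = [[0]*(total//2+1) for _ in range(n+1)]
    let dp := ((PySem.List.pyRange 0 (n + 1) 1).map
      (fun _ => Array.replicate (half + 1).toNat (0 : Int))).toArray
    -- for i in range(n+1): dp[i][0] = 1   (loop indices are ≥ 0, so .toNat is exact)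
    let dp := (PySem.List.pyRange 0 (n + 1) 1).foldl
      (fun dp i => pvSetCell dp i.toNat 0 1) dp
    -- for i in range(1, n+1): for j in range(1, total//2+1): …
    let dp := (PySem.List.pyRange 1 (n + 1) 1).foldl (fun dp i =>
      (PySem.List.pyRange 1 (half + 1) 1).foldl (fun dp j =>
        let v := pvGetCell dp (i - 1).toNat j.toNat
        let v := if j - i ≥ 0 then v + pvGetCell dp (i - 1).toNat (j - i).toNat else v
        pvSetCell dp i.toNat j.toNat v) dp) dp
    -- return dp[n][total//2]//2   (n ≥ 0 and in range under Pre_)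
    PySem.Int.floordiv (pvGetCell dp n.toNat half.toNat) 2

-- ===== PORT B =====
-- f(i, j) with the memo table threaded through the recursion; Python recurses on
-- i decreasing to 0 and under Pre_ the start index n is ≥ 0, so structural
-- recursion on a Nat first argument is exact; every j reached from the start call
-- f(n, half) is ≥ 0 (half ≥ 0, and f(i-1, j-i) is guarded by j >= i), so the
-- .toNat on the memo column index is exact wherever the Python runs.
def pvFB : Nat → Int → Array (Array (Option Int)) → Int × Array (Array (Option Int))
  | 0, j, memo => (if j = 0 then 1 else 0, memo)
  | i + 1, j, memo =>
    -- if memo[i][j] is None: …; return memo[i][j]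
    match (memo.getD (i + 1) #[]).getD j.toNat none with
    | some v => (v, memo)
    | none =>
      let p1 := pvFB i j memo                      -- r = f(i-1, j)
      let p2 := if j ≥ (i : Int) + 1 then          -- if j >= i: r += f(i-1, j-i)
          (p1.1 + (pvFB i (j - ((i : Int) + 1)) p1.2).1,
           (pvFB i (j - ((i : Int) + 1)) p1.2).2)
        else p1
      -- memo[i][j] = r
      (p2.1, pvSetCell p2.2 (i + 1) j.toNat (some p2.1))

def solution_alt (n : Int) : Int :=
  let total := PySem.Int.floordiv (n * (n + 1)) 2
  if PySem.Int.mod total 2 = 1 then 0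
  else
    let half := PySem.Int.floordiv total 2
    -- memo = [[None]*(half+1) for _ in range(n+1)]
    let memo := ((PySem.List.pyRange 0 (n + 1) 1).map
      (fun _ => Array.replicate (half + 1).toNat (none : Option Int))).toArray
    PySem.Int.floordiv (pvFB n.toNat half memo).1 2

-- ===== PRECONDITION & SPEC =====
-- Pre_ excludes negative n whose triangular total n*(n+1)//2 is even: there both A and
-- B build an empty table (range(n+1) is empty) and raise IndexError on its first use;
-- on negative n with odd total both take the early return before touching it and are covered.
def Pre_solution (n : Int) : Prop :=
  0 ≤ n ∨ PySem.Int.mod (PySem.Int.floordiv (n * (n + 1)) 2) 2 = 1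
instance (n : Int) : Decidable (Pre_solution n) := by unfold Pre_solution; infer_instance
def pvWitness_solution : Int := (7)

def Spec_solution (n : Int) (out : Int) : Prop := out = solution_alt n
instance (n : Int) (out : Int) : Decidable (Spec_solution n out) := by
  unfold Spec_solution; infer_instance

-- ===== CLAIM (what is proved, stated in full; the proofs are below) =====
def Claim_equal_solution : Prop :=
  ∀ (n : Int), Dom_solution n → Pre_solution n → Spec_solution n (solution n)

-- ===== LEMMAS AND PROOFS =====

-- the common recurrence: gA i j = number of subsets of {1..i} with sum j
def gA : Nat → Nat → Int
  | 0, 0 => 1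
  | 0, _ + 1 => 0
  | i + 1, j => gA i j + (if i + 1 ≤ j then gA i (j - (i + 1)) else 0)

lemma gA_zero (i : Nat) : gA i 0 = 1 := by
  induction i with
  | zero => rfl
  | succ i ih => simp [gA, ih]

-- ---- generic Array/List bridge ----
lemma pvSetCell_eq {α : Type} (dp : Array (Array α)) (i j : Nat) (v : α) :
    pvSetCell dp i j v = dp.setIfInBounds i ((dp.getD i #[]).setIfInBounds j v) := by
  apply Array.toList_inj.mp
  simp [pvSetCell, Array.toList_setIfInBounds]

lemma pvArrGetD {α : Type} (a : Array α) (i : Nat) (d : α) : a.getD i d = (a[i]?).getD d := by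
  rw [Array.getD]
  split_ifs with h
  · simp [Array.getElem?_eq_getElem h]
  · simp [Array.getElem?_eq_none (by omega : a.size ≤ i)]

lemma pvListGetD_toList {α : Type} (a : Array α) (i : Nat) (d : α) :
    a.toList.getD i d = a.getD i d := by
  rw [List.getD_eq_getElem?_getD, Array.getElem?_toList, pvArrGetD]

lemma pvArrGetD_set {α : Type} (a : Array α) (k t : Nat) (v d : α) :
    (a.setIfInBounds k v).getD t d = if t = k ∧ k < a.size then v else a.getD t d := by
  rw [pvArrGetD, pvArrGetD, Array.getElem?_setIfInBounds]
  split_ifs <;> simp_all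

-- the abstraction of the Array-of-Arrays table as a list of lists
def pvL (dp : Array (Array Int)) : List (List Int) := dp.toList.map Array.toList

lemma pvL_getD (dp : Array (Array Int)) (i : Nat) :
    (pvL dp).getD i [] = (dp.getD i #[]).toList := by
  rw [pvL, List.getD_eq_getElem?_getD, List.getElem?_map, Array.getElem?_toList, pvArrGetD]
  cases dp[i]? <;> simp

-- list-level versions of the cell helpers (the invariant proofs run over these)
def pvGetCellL (dp : List (List Int)) (i j : Nat) : Int := (dp.getD i []).getD j 0
def pvSetCellL (dp : List (List Int)) (i j : Nat) (v : Int) : List (List Int) :=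
  dp.set i ((dp.getD i []).set j v)

lemma pvGetCell_L (dp : Array (Array Int)) (i j : Nat) :
    pvGetCell dp i j = pvGetCellL (pvL dp) i j := by
  rw [pvGetCell, pvGetCellL, pvL_getD, pvListGetD_toList]

lemma pvSetCell_L (dp : Array (Array Int)) (i j : Nat) (v : Int) :
    pvL (pvSetCell dp i j v) = pvSetCellL (pvL dp) i j v := by
  rw [pvSetCell_eq, pvSetCellL, pvL, Array.toList_setIfInBounds, List.map_set,
      Array.toList_setIfInBounds, ← pvL, pvL_getD]

lemma pvFoldl_L {α β : Type} (g : α → β) (fA : α → Int → α) (fL : β → Int → β)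
    (h : ∀ d x, g (fA d x) = fL (g d) x) :
    ∀ (l : List Int) (init : α), g (l.foldl fA init) = l.foldl fL (g init) := by
  intro l
  induction l with
  | nil => intro init; rfl
  | cons x xs ih => intro init; rw [List.foldl_cons, List.foldl_cons, ih, h]

-- row i of the table, as a pure list
def pvRow (M i : Nat) : List Int := (List.range (M + 1)).map (gA i)

lemma getD_map_range' {α : Type} (f : Nat → α) (c k : Nat) (d : α) (h : k < c) :
    ((List.range c).map f).getD k d = f k := by
  rw [List.getD_eq_getElem?_getD]
  simp [h]

lemma pvRow_zero (M : Nat) : pvRow M 0 = 1 :: List.replicate M 0 := by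
  unfold pvRow
  rw [List.range_succ_eq_map]
  simp only [List.map_cons, List.map_map]
  rw [show gA 0 0 = 1 from rfl]
  congr 1
  rw [show ((List.range M).map (gA 0 ∘ Nat.succ)) = (List.range M).map (fun _ => (0:Int)) from
    List.map_congr_left (by intro a _; simp [Function.comp, gA])]
  simp [List.map_const']

-- ---- stage 1: zero table then first column set to 1 ----
lemma pvStage1_aux (N M : Nat) :
    ∀ m, m ≤ N + 1 → (List.range m).foldl (fun dp k => pvSetCellL dp k 0 1)
      (List.replicate (N + 1) (List.replicate (M + 1) 0))
    = List.replicate m (1 :: List.replicate M 0)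
      ++ List.replicate (N + 1 - m) (List.replicate (M + 1) 0) := by
  intro m
  induction m with
  | zero => intro _; simp
  | succ m ih =>
    intro h
    rw [List.range_succ, List.foldl_append, ih (by omega)]
    simp only [List.foldl_cons, List.foldl_nil]
    unfold pvSetCellL
    rw [List.getD_eq_getElem?_getD, List.getElem?_append_right (by simp)]
    have hlt : 0 < N + 1 - m := by omega
    simp only [List.length_replicate]
    rw [show m - m = 0 from by omega]
    obtain ⟨r, hr⟩ : ∃ r, N + 1 - m = r + 1 := ⟨N - m, by omega⟩
    rw [hr, List.replicate_succ]
    simp only [List.getElem?_cons_zero, Option.getD_some]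
    rw [List.set_append_right _ _ (by simp), List.replicate_succ]
    simp only [List.length_replicate]
    rw [show m - m = 0 from by omega]
    simp only [List.set_cons_zero]
    rw [show N + 1 - (m + 1) = r from by omega, List.replicate_succ']
    simp [List.append_assoc]

-- partial row during the inner loop: first t+1 cells computed, rest still 0
def pvPart (M I t : Nat) : List Int := (List.range (t + 1)).map (gA I) ++ List.replicate (M - t) 0

-- dp during the outer loop after rows 1..c are done
def pvTab (N M c : Nat) : List (List Int) :=
  (List.range (c + 1)).map (pvRow M) ++ List.replicate (N - c) (pvRow M 0)

def pvStepJ (dp : List (List Int)) (I j : Nat) : List (List Int) :=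
  pvSetCellL dp I j
    (pvGetCellL dp (I - 1) j + if I ≤ j then pvGetCellL dp (I - 1) (j - I) else 0)

-- dp during the inner loop at row I, after inner indices 1..t are done
def pvMid (N M I t : Nat) : List (List Int) :=
  (List.range I).map (pvRow M) ++ [pvPart M I t] ++ List.replicate (N - I) (pvRow M 0)

lemma pvPart_zero (M I : Nat) : pvPart M I 0 = pvRow M 0 := by
  unfold pvPart
  rw [pvRow_zero]
  simp [gA_zero]

lemma pvPart_last (M I : Nat) : pvPart M I M = pvRow M I := by
  unfold pvPart pvRow; simp

lemma pvMid_zero (N M I : Nat) (h1 : 1 ≤ I) (hIN : I ≤ N) :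
    pvMid N M I 0 = pvTab N M (I - 1) := by
  unfold pvMid pvTab
  rw [pvPart_zero]
  rw [show I - 1 + 1 = I from by omega]
  obtain ⟨r, hr⟩ : ∃ r, N - (I - 1) = r + 1 := ⟨N - I, by omega⟩
  rw [hr, List.replicate_succ, show r = N - I from by omega]
  simp

lemma pvMid_last (N M I : Nat) : pvMid N M I M = pvTab N M I := by
  unfold pvMid pvTab
  rw [pvPart_last, List.range_succ]
  simp

lemma pvStepJ_mid (N M I t : Nat) (h1 : 1 ≤ I) (hIN : I ≤ N) (ht : t < M) :
    pvStepJ (pvMid N M I t) I (t + 1) = pvMid N M I (t + 1) := by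
  have hlen : ((List.range I).map (pvRow M)).length = I := by simp
  have hrowI : (pvMid N M I t).getD I [] = pvPart M I t := by
    unfold pvMid
    rw [List.getD_eq_getElem?_getD, List.append_assoc,
        List.getElem?_append_right (by simp [hlen])]
    simp [hlen]
  have hrowP : (pvMid N M I t).getD (I - 1) [] = pvRow M (I - 1) := by
    unfold pvMid
    rw [List.getD_eq_getElem?_getD, List.append_assoc,
        List.getElem?_append_left (by simp [hlen]; omega)]
    simp only [List.getElem?_map, List.getElem?_range (by omega : I - 1 < I)]
    rfl
  have hget : ∀ j, j ≤ M → pvGetCellL (pvMid N M I t) (I - 1) j = gA (I - 1) j := by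
    intro j hj
    unfold pvGetCellL
    rw [hrowP]
    unfold pvRow
    exact getD_map_range' (gA (I-1)) (M+1) j 0 (by omega)
  unfold pvStepJ pvSetCellL
  rw [hrowI, hget (t+1) (by omega)]
  have hval : (gA (I - 1) (t + 1) +
      if I ≤ t + 1 then pvGetCellL (pvMid N M I t) (I - 1) (t + 1 - I) else 0)
      = gA I (t + 1) := by
    obtain ⟨i, rfl⟩ : ∃ i, I = i + 1 := ⟨I - 1, by omega⟩
    rw [gA]
    by_cases hc : i + 1 ≤ t + 1
    · rw [if_pos hc, if_pos hc, hget _ (by omega)]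
      simp
    · rw [if_neg hc, if_neg hc]
      simp
  rw [hval]
  have hpart : (pvPart M I t).set (t + 1) (gA I (t + 1)) = pvPart M I (t + 1) := by
    unfold pvPart
    rw [List.set_append_right _ _ (by simp), List.length_map, List.length_range,
        show t + 1 - (t + 1) = 0 from by omega]
    obtain ⟨r, hr⟩ : ∃ r, M - t = r + 1 := ⟨M - t - 1, by omega⟩
    rw [hr, List.replicate_succ, List.set_cons_zero,
        show r = M - (t + 1) from by omega,
        List.range_succ (n := t + 1)]
    simp [List.append_assoc]
  rw [hpart]
  unfold pvMid
  rw [List.append_assoc, List.set_append_right _ _ (by simp [hlen]), hlen,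
      show I - I = 0 from by omega, List.append_assoc]
  simp

lemma pvInner (N M I : Nat) (h1 : 1 ≤ I) (hIN : I ≤ N) :
    ∀ t, t ≤ M → (List.range t).foldl (fun dp u => pvStepJ dp I (u + 1)) (pvMid N M I 0)
      = pvMid N M I t := by
  intro t
  induction t with
  | zero => intro _; rfl
  | succ t ih =>
    intro h
    rw [List.range_succ, List.foldl_append, ih (by omega)]
    exact pvStepJ_mid N M I t h1 hIN (by omega)

lemma pvOuter (N M : Nat) :
    ∀ c, c ≤ N → (List.range c).foldl
      (fun dp k => (List.range M).foldl (fun dp u => pvStepJ dp (k + 1) (u + 1)) dp)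
      (pvTab N M 0)
    = pvTab N M c := by
  intro c
  induction c with
  | zero => intro _; rfl
  | succ c ih =>
    intro h
    rw [List.range_succ, List.foldl_append, ih (by omega)]
    simp only [List.foldl_cons, List.foldl_nil]
    rw [show pvTab N M c = pvMid N M (c + 1) 0 by
          rw [pvMid_zero N M (c+1) (by omega) (by omega)]; rfl,
        pvInner N M (c + 1) (by omega) (by omega) M (le_refl M)]
    exact pvMid_last N M (c + 1)

lemma pvTab_read (N M : Nat) : pvGetCellL (pvTab N M N) N M = gA N M := by
  unfold pvTab pvGetCellL
  simp only [Nat.sub_self, List.replicate_zero, List.append_nil]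
  rw [getD_map_range' (pvRow M) (N+1) N [] (by omega)]
  unfold pvRow
  rw [getD_map_range' (gA N) (M+1) M 0 (by omega)]

lemma pv_total_nonneg (n : Int) : 0 ≤ PySem.Int.floordiv (n * (n + 1)) 2 := by
  rw [PySem.Int.floordiv_eq_ediv_of_pos (by norm_num)]
  apply Int.ediv_nonneg _ (by norm_num)
  nlinarith [sq_nonneg n, sq_nonneg (n + 1)]

lemma pvTab_zero (N M : Nat) : pvTab N M 0 = List.replicate (N + 1) (pvRow M 0) := by
  unfold pvTab
  simp [List.replicate_succ]

lemma pv_half_nonneg (n : Int) :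
    0 ≤ PySem.Int.floordiv (PySem.Int.floordiv (n * (n + 1)) 2) 2 := by
  rw [PySem.Int.floordiv_eq_ediv_of_pos (b := 2) (by norm_num)]
  exact Int.ediv_nonneg (pv_total_nonneg n) (by norm_num)

-- A's computation replayed over lists via the pvL abstraction, then characterised
lemma solution_eq_gA (n : Int) (hn : 0 ≤ n)
    (h : ¬ PySem.Int.mod (PySem.Int.floordiv (n * (n + 1)) 2) 2 = 1) :
    solution n = PySem.Int.floordiv
      (gA n.toNat (PySem.Int.floordiv (PySem.Int.floordiv (n * (n + 1)) 2) 2).toNat) 2 := by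
  have hhalf := pv_half_nonneg n
  set half := PySem.Int.floordiv (PySem.Int.floordiv (n * (n + 1)) 2) 2 with hhalfdef
  set N := n.toNat with hN
  set M := half.toNat with hM
  have hn1 : (n + 1 - 0).toNat = N + 1 := by omega
  have hn1' : (n + 1 - 1).toNat = N := by omega
  have hh1 : (half + 1).toNat = M + 1 := by omega
  have hh1' : (half + 1 - 1).toNat = M := by omega
  simp only [solution, if_neg h, ← hhalfdef]
  -- move from the Array table to its pvL list image
  rw [pvGetCell_L,
      pvFoldl_L pvL _
        (fun dp i =>
          (PySem.List.pyRange 1 (half + 1) 1).foldl (fun dp j =>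
            pvSetCellL dp i.toNat j.toNat
              (if j - i ≥ 0 then
                pvGetCellL dp (i - 1).toNat j.toNat + pvGetCellL dp (i - 1).toNat (j - i).toNat
              else pvGetCellL dp (i - 1).toNat j.toNat)) dp)
        (by
          intro d x
          exact pvFoldl_L pvL _ _
            (by
              intro d' x'
              rw [pvSetCell_L]
              simp only [pvGetCell_L]) _ d),
      pvFoldl_L pvL _ (fun dp i => pvSetCellL dp i.toNat 0 1)
        (by intro d x; exact pvSetCell_L d x.toNat 0 1)]
  -- the initial Array table maps to the replicated list table
  rw [show pvL (((PySem.List.pyRange 0 (n + 1) 1).map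
        (fun _ => Array.replicate (half + 1).toNat (0 : Int))).toArray)
      = (PySem.List.pyRange 0 (n + 1) 1).map (fun _ => List.replicate (M + 1) (0 : Int)) from by
    rw [pvL]
    simp only [List.map_map]
    exact List.map_congr_left (by intro a _; simp [Function.comp, Array.toList_replicate, hh1])]
  -- from here on, the original list-level argument
  rw [PySem.List.pyRange_one 0 (n + 1), PySem.List.pyRange_one 1 (n + 1), hn1, hn1']
  rw [List.map_map]
  rw [show ((fun (_ : Int) => List.replicate (M + 1) (0 : Int)) ∘ fun (k : Nat) => (0 : Int) + (k : Int))
      = fun (_ : Nat) => List.replicate (M + 1) (0 : Int) from rfl]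
  rw [List.map_const', List.length_range]
  rw [List.foldl_map, List.foldl_map]
  rw [show (fun (dp : List (List Int)) (k : Nat) => pvSetCellL dp ((0 : Int) + (k : Int)).toNat 0 1)
      = fun dp k => pvSetCellL dp k 0 1 from by funext dp k; norm_num]
  rw [pvStage1_aux N M (N + 1) (le_refl _)]
  simp only [Nat.sub_self, List.replicate_zero, List.append_nil]
  rw [← pvRow_zero M, ← pvTab_zero N M]
  rw [show (fun (dp : List (List Int)) (k : Nat) =>
        (PySem.List.pyRange 1 (half + 1) 1).foldl (fun dp j =>
          pvSetCellL dp ((1 : Int) + (k : Int)).toNat j.toNat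
            (if j - ((1 : Int) + (k : Int)) ≥ 0 then
              pvGetCellL dp (((1 : Int) + (k : Int)) - 1).toNat j.toNat
                + pvGetCellL dp (((1 : Int) + (k : Int)) - 1).toNat (j - ((1 : Int) + (k : Int))).toNat
            else pvGetCellL dp (((1 : Int) + (k : Int)) - 1).toNat j.toNat)) dp)
      = fun dp k => (List.range M).foldl (fun dp u => pvStepJ dp (k + 1) (u + 1)) dp from by
    funext dp k
    rw [PySem.List.pyRange_one 1 (half + 1), hh1', List.foldl_map]
    congr 1
    funext dp' u
    simp only [pvStepJ]
    rw [show (((1 : Int) + (k : Int)) - 1).toNat = k from by omega,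
        show ((1 : Int) + (u : Int)).toNat = u + 1 from by omega,
        show ((1 : Int) + (k : Int)).toNat = k + 1 from by omega]
    by_cases hc : ((1 : Int) + (u : Int)) - ((1 : Int) + (k : Int)) ≥ 0
    · rw [if_pos hc, if_pos (by omega : k + 1 ≤ u + 1),
          show (((1 : Int) + (u : Int)) - ((1 : Int) + (k : Int))).toNat = u + 1 - (k + 1) from by omega]
      norm_num
    · rw [if_neg hc, if_neg (by omega : ¬ (k + 1 ≤ u + 1))]
      norm_num]
  rw [pvOuter N M N (le_refl N), ← hN, ← hM, pvTab_read N M]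

-- ---- B side: the memo table only ever holds correct values of gA ----
def pvMemoOK (m : Array (Array (Option Int))) : Prop :=
  ∀ (i j : Nat) (v : Int), (m.getD i #[]).getD j none = some v → v = gA i j

lemma pvFB_correct : ∀ (i : Nat) (j : Int), 0 ≤ j →
    ∀ (m : Array (Array (Option Int))), pvMemoOK m →
    (pvFB i j m).1 = gA i j.toNat ∧ pvMemoOK (pvFB i j m).2 := by
  intro i
  induction i with
  | zero =>
    intro j hj m hm
    refine ⟨?_, hm⟩
    show (if j = 0 then 1 else 0) = gA 0 j.toNat
    by_cases h0 : j = 0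
    · subst h0; rfl
    · rw [if_neg h0]
      obtain ⟨k, hk⟩ : ∃ k, j.toNat = k + 1 := ⟨j.toNat - 1, by omega⟩
      rw [hk, gA]
  | succ i ih =>
    intro j hj m hm
    unfold pvFB
    cases hg : (m.getD (i + 1) #[]).getD j.toNat none with
    | some v => exact ⟨hm _ _ _ hg, hm⟩
    | none =>
      simp only []
      obtain ⟨h1v, h1m⟩ := ih j hj m hm
      have hsplit : gA (i + 1) j.toNat
          = gA i j.toNat + (if i + 1 ≤ j.toNat then gA i (j.toNat - (i + 1)) else 0) := by
        rw [gA]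
      by_cases hc : j ≥ (i : Int) + 1
      · obtain ⟨h2v, h2m⟩ := ih (j - ((i : Int) + 1)) (by omega) (pvFB i j m).2 h1m
        rw [if_pos hc]
        have hval : (pvFB i j m).1 + (pvFB i (j - ((i : Int) + 1)) (pvFB i j m).2).1
            = gA (i + 1) j.toNat := by
          rw [h1v, h2v, hsplit, if_pos (by omega : i + 1 ≤ j.toNat),
              show (j - ((i : Int) + 1)).toNat = j.toNat - (i + 1) from by omega]
        refine ⟨hval, ?_⟩
        intro i' j' v' hget
        rw [pvSetCell_eq, pvArrGetD_set] at hget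
        split_ifs at hget with hp
        · rw [pvArrGetD_set] at hget
          split_ifs at hget with hq
          · obtain ⟨hq1, _⟩ := hq
            obtain ⟨hp1, _⟩ := hp
            simp only [Option.some.injEq] at hget
            rw [← hget, hp1, hq1]
            exact hval
          · exact h2m _ _ _ (by rw [hp.1]; exact hget)
        · exact h2m _ _ _ hget
      · rw [if_neg hc]
        have hval : (pvFB i j m).1 = gA (i + 1) j.toNat := by
          rw [h1v, hsplit, if_neg (by omega : ¬ (i + 1 ≤ j.toNat)), add_zero]
        refine ⟨hval, ?_⟩
        intro i' j' v' hget
        rw [pvSetCell_eq, pvArrGetD_set] at hget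
        split_ifs at hget with hp
        · rw [pvArrGetD_set] at hget
          split_ifs at hget with hq
          · obtain ⟨hq1, _⟩ := hq
            obtain ⟨hp1, _⟩ := hp
            simp only [Option.some.injEq] at hget
            rw [← hget, hp1, hq1]
            exact hval
          · exact h1m _ _ _ (by rw [hp.1]; exact hget)
        · exact h1m _ _ _ hget

lemma pvMemoOK_init (l : List Int) (c : Nat) :
    pvMemoOK ((l.map (fun _ => Array.replicate c (none : Option Int))).toArray) := by
  intro i j v hget
  exfalso
  rw [pvArrGetD ((l.map (fun _ => Array.replicate c (none : Option Int))).toArray) i #[],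
      List.getElem?_toArray, List.getElem?_map] at hget
  cases hl : l[i]? with
  | none => rw [hl] at hget; simp at hget
  | some x =>
    rw [hl] at hget
    simp only [Option.map_some, Option.getD_some] at hget
    rw [pvArrGetD, Array.getElem?_replicate] at hget
    split_ifs at hget <;> simp_all

lemma solution_alt_eq_gA (n : Int)
    (h : ¬ PySem.Int.mod (PySem.Int.floordiv (n * (n + 1)) 2) 2 = 1) :
    solution_alt n = PySem.Int.floordiv
      (gA n.toNat (PySem.Int.floordiv (PySem.Int.floordiv (n * (n + 1)) 2) 2).toNat) 2 := by
  have hhalf := pv_half_nonneg n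
  set half := PySem.Int.floordiv (PySem.Int.floordiv (n * (n + 1)) 2) 2 with hhalfdef
  simp only [solution_alt, if_neg h, ← hhalfdef]
  rw [(pvFB_correct n.toNat half hhalf _ (pvMemoOK_init _ _)).1]

-- ===== VERDICT (by name: the statement is the Claim_ definition above) =====
theorem solution_spec : Claim_equal_solution := by
  intro n _ hpre
  unfold Spec_solution
  by_cases h : PySem.Int.mod (PySem.Int.floordiv (n * (n + 1)) 2) 2 = 1
  · simp only [solution, solution_alt, h, if_pos]
  · have hn : 0 ≤ n := by
      rcases hpre with hn | hodd
      · exact hn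
      · exact absurd hodd h
    rw [solution_eq_gA n hn h, solution_alt_eq_gA n h]
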